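-- pv_equiv track=rewrite | github.com/CQCL/classification-with-qttn | preprocessing/NLP_preprocess.py | reorder_split_inds
-- ===== SOURCE A (Python) =====
-- def reorder_split_inds(ordered_inds, split_inds, split_labels):
--     reordered_inds = []
--     reordered_labels = []
--     for set in ordered_inds:
--         temp_inds = []
--         temp_labels = []
--         for ind, label in zip(split_inds, split_labels):
--             if ind in set:
--                 temp_inds.append(ind)
--                 temp_labels.append(label)
--         reordered_inds.append(temp_inds)
--         reordered_labels.append(temp_labels)
--     return reordered_inds, reordered_labels
-- ===== SOURCE B (Python) =====
-- def reorder_split_inds(ordered_inds, split_inds, split_labels):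
--     # index: which set(s) each ind belongs to (dedup within a set preserving order)
--     where = {}
--     for j, s in enumerate(ordered_inds):
--         for x in dict.fromkeys(s):
--             where.setdefault(x, []).append(j)
--     reordered_inds = [[] for _ in ordered_inds]
--     reordered_labels = [[] for _ in ordered_inds]
--     for ind, label in zip(split_inds, split_labels):
--         for j in where.get(ind, ()):
--             reordered_inds[j].append(ind)
--             reordered_labels[j].append(label)
--     return reordered_inds, reordered_labels
-- ===== Notes on version B (the rewrite author's own statement) =====
-- stated objective: alternative
-- what changed: Replaced the per-set rescan of split_inds with list membership by a precomputed dict mapping each index value to the (deduplicated) list of sets containing it, then a single pass over the split pairs that appends each pair to its buckets.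
import Mathlib
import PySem

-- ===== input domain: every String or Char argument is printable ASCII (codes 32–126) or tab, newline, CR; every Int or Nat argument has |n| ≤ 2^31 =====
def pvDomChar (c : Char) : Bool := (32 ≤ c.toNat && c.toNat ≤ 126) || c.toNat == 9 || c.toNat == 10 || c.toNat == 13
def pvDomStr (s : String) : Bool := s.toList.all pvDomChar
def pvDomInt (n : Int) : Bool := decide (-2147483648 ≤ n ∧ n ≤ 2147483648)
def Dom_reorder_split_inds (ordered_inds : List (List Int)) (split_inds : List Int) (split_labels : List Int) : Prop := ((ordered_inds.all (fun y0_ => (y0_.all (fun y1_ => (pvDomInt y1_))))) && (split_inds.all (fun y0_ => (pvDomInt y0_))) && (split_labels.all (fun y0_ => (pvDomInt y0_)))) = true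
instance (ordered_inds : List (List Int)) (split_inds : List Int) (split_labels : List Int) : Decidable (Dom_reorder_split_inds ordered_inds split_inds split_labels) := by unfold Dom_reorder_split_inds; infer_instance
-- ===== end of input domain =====

-- B replaces A's per-set rescans of split_inds (list membership) by a dict ind → containing-set
-- indices built once, then one pass over the split pairs filling the buckets (objective: alternative).

-- ===== PORT A =====
def reorder_split_inds (ordered_inds : List (List Int)) (split_inds : List Int) (split_labels : List Int) : List (List Int) × List (List Int) :=
  ordered_inds.foldl
    (fun acc s =>
      let t := (split_inds.zip split_labels).foldl
        (fun t p => if p.1 ∈ s then (t.1 ++ [p.1], t.2 ++ [p.2]) else t) ([], [])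
      (acc.1 ++ [t.1], acc.2 ++ [t.2]))
    ([], [])

-- ===== PORT B =====
def reorder_split_inds_alt (ordered_inds : List (List Int)) (split_inds : List Int) (split_labels : List Int) : List (List Int) × List (List Int) :=
  -- where.setdefault(x, []).append(j)  ==  where[x] = where.get(x, []) + [j]  ==  Dict.modify
  let w : PySem.Dict Int (List Int) :=
    (PySem.List.enumerate ordered_inds).foldl
      (fun d p => (PySem.List.dedup p.2).foldl (fun d x => d.modify x [] (· ++ [p.1])) d)
      PySem.Dict.empty
  -- every j stored in w is a nonnegative enumerate index, so .toNat is exact here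
  (split_inds.zip split_labels).foldl
    (fun acc p =>
      (w.getD p.1 []).foldl
        (fun acc j =>
          (acc.1.set j.toNat (acc.1.getD j.toNat [] ++ [p.1]),
           acc.2.set j.toNat (acc.2.getD j.toNat [] ++ [p.2]))) acc)
    (ordered_inds.map (fun _ => []), ordered_inds.map (fun _ => []))

-- ===== PRECONDITION & SPEC =====
def Spec_reorder_split_inds (ordered_inds : List (List Int)) (split_inds : List Int) (split_labels : List Int) (out : List (List Int) × List (List Int)) : Prop := out = reorder_split_inds_alt ordered_inds split_inds split_labels
instance (ordered_inds : List (List Int)) (split_inds : List Int) (split_labels : List Int) (out : List (List Int) × List (List Int)) : Decidable (Spec_reorder_split_inds ordered_inds split_inds split_labels out) := by unfold Spec_reorder_split_inds; infer_instance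

-- ===== CLAIM (what is proved, stated in full; the proofs are below) =====
def Claim_equal_reorder_split_inds : Prop := ∀ (ordered_inds : List (List Int)) (split_inds : List Int) (split_labels : List Int), Dom_reorder_split_inds ordered_inds split_inds split_labels → Spec_reorder_split_inds ordered_inds split_inds split_labels (reorder_split_inds ordered_inds split_inds split_labels)

-- ===== LEMMAS AND PROOFS =====

-- the list of (Int) indices of sets in `oi` (numbered from k) that contain x, in order
def pvSel (x : Int) : List (List Int) → Int → List Int
  | [], _ => []
  | s :: r, k => (if x ∈ s then [k] else []) ++ pvSel x r (k + 1)

theorem pvSel_bound {x : Int} {oi : List (List Int)} {k j : Int} (h : j ∈ pvSel x oi k) :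
    k ≤ j ∧ j < k + oi.length := by
  induction oi generalizing k with
  | nil => simp [pvSel] at h
  | cons s r ih =>
    simp only [pvSel, List.mem_append] at h
    rcases h with h | h
    · split at h <;> simp_all <;> omega
    · have := ih h
      simp only [List.length_cons]
      omega

theorem pvSel_nodup (x : Int) (oi : List (List Int)) (k : Int) : (pvSel x oi k).Nodup := by
  induction oi generalizing k with
  | nil => simp [pvSel]
  | cons s r ih =>
    simp only [pvSel]
    refine List.Nodup.append ?_ (ih _) ?_
    · split <;> simp
    · intro a ha hb
      have hbd := pvSel_bound hb
      split at ha <;> simp_all <;> omega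

theorem pvSel_mem_iff (x : Int) (oi : List (List Int)) (k : Int) (i : Nat) (hi : i < oi.length) :
    ((k + i : Int) ∈ pvSel x oi k) ↔ x ∈ oi[i] := by
  induction oi generalizing k i with
  | nil => simp at hi
  | cons s r ih =>
    cases i with
    | zero =>
      simp only [pvSel, List.mem_append, List.getElem_cons_zero]
      constructor
      · rintro (h | h)
        · split at h <;> simp_all
        · have := pvSel_bound h; omega
      · intro h; left; simp [h]
    | succ i =>
      have hi' : i < r.length := by simpa using hi
      have := ih (k + 1) i hi'
      simp only [pvSel, List.mem_append, List.getElem_cons_succ]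
      have harith : (k + (i + 1 : Nat) : Int) = (k + 1) + i := by push_cast; ring
      rw [harith]
      constructor
      · rintro (h | h)
        · split at h <;> simp_all; omega
        · exact this.mp h
      · intro h; right; exact this.mpr h

theorem pvSel_mem_getD (x : Int) (oi : List (List Int)) (i : Nat) :
    ((i : Int) ∈ pvSel x oi 0) ↔ x ∈ oi.getD i [] := by
  by_cases hi : i < oi.length
  · have := pvSel_mem_iff x oi 0 i hi
    rw [List.getD_eq_getElem _ _ hi]
    simpa using this
  · constructor
    · intro h; have := pvSel_bound h; omega
    · intro h
      rw [List.getD_eq_default _ _ (by omega)] at h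
      simp at h

-- nodup-list filter by beq
theorem filter_beq_of_nodup (l : List Int) (hnd : l.Nodup) (x : Int) :
    l.filter (· == x) = if x ∈ l then [x] else [] := by
  induction l with
  | nil => simp
  | cons y t ih =>
    rcases List.nodup_cons.mp hnd with ⟨hy, ht⟩
    by_cases h : y = x
    · subst h
      simp [List.filter_cons, ih ht, hy]
    · simp [List.filter_cons, Ne.symm h, ih ht, h]

-- inner dict loop over the deduplicated elements of one set
theorem inner_dict (s : List Int) (k : Int) (d : PySem.Dict Int (List Int)) (x : Int) :
    ((PySem.List.dedup s).foldl (fun d y => d.modify y [] (· ++ [k])) d).getD x []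
      = d.getD x [] ++ (if x ∈ s then [k] else []) := by
  have h1 : (PySem.List.dedup s).foldl (fun d y => d.modify y [] (· ++ [k])) d
      = ((PySem.List.dedup s).map (fun y => (y, k))).foldl (fun d q => d.modify q.1 [] (· ++ [q.2])) d := by
    rw [List.foldl_map]
  rw [h1, PySem.Dict.getD_foldl_modify_append]
  congr 1
  rw [List.filter_map]
  have h2 : ((PySem.List.dedup s).filter ((fun q => q.1 == x) ∘ fun y => (y, k)))
      = (PySem.List.dedup s).filter (· == x) := by
    apply List.filter_congr; intro y _; simp [Function.comp]
  rw [h2, filter_beq_of_nodup _ (PySem.List.nodup_dedup s) x]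
  by_cases h : x ∈ s <;> simp [h, PySem.List.mem_dedup]

-- the dict built by B: its value at x is exactly pvSel x oi k
theorem w_getD (oi : List (List Int)) (k : Int) (d : PySem.Dict Int (List Int)) (x : Int) :
    ((PySem.List.enumerate oi k).foldl
        (fun d p => (PySem.List.dedup p.2).foldl (fun d x => d.modify x [] (· ++ [p.1])) d) d).getD x []
      = d.getD x [] ++ pvSel x oi k := by
  induction oi generalizing k d with
  | nil => simp [PySem.List.enumerate_nil, pvSel]
  | cons s r ih =>
    rw [PySem.List.enumerate_cons]
    simp only [List.foldl_cons]
    rw [ih, inner_dict]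
    simp [pvSel, List.append_assoc]

-- a fold over a pair whose components evolve independently splits
theorem foldl_pair_split {α : Type} (js : List α) (f g : List (List Int) → α → List (List Int))
    (a b : List (List Int)) :
    js.foldl (fun acc j => (f acc.1 j, g acc.2 j)) (a, b) = (js.foldl f a, js.foldl g b) := by
  induction js generalizing a b with
  | nil => rfl
  | cons j t ih => simp only [List.foldl_cons]; exact ih (f a j) (g b j)

-- the bucket-append fold over a nodup list of in-range nonneg indices, pointwise
theorem setfold_getD (js : List Int) (hnd : js.Nodup) (v : Int) (L : List (List Int))
    (hb : ∀ j ∈ js, 0 ≤ j ∧ j.toNat < L.length) (i : Nat) :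
    (js.foldl (fun M j => M.set j.toNat (M.getD j.toNat [] ++ [v])) L).getD i []
      = L.getD i [] ++ (if (i : Int) ∈ js then [v] else []) := by
  induction js generalizing L with
  | nil => simp
  | cons j t ih =>
    rcases List.nodup_cons.mp hnd with ⟨hj, ht⟩
    rcases hb j (by simp) with ⟨hj0, hjlt⟩
    simp only [List.foldl_cons]
    rw [ih ht _ (fun j' hj' => by
        rcases hb j' (by simp [hj']) with ⟨h0, hlt⟩
        exact ⟨h0, by simpa using hlt⟩)]
    by_cases hij : (i : Int) = j
    · have hti : j.toNat = i := by omega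
      have hit : (i : Int) ∉ t := hij ▸ hj
      rw [List.getD_eq_getElem?_getD, List.getElem?_set, if_pos hti, if_pos (hti ▸ hjlt)]
      simp [hit, hij, hti, hj, ← List.getD_eq_getElem?_getD]
    · have hti : j.toNat ≠ i := by omega
      rw [List.getD_eq_getElem?_getD, List.getElem?_set, if_neg hti,
        ← List.getD_eq_getElem?_getD]
      simp [List.mem_cons, hij]

theorem setfold_length (js : List Int) (v : Int) (L : List (List Int)) :
    (js.foldl (fun M j => M.set j.toNat (M.getD j.toNat [] ++ [v])) L).length = L.length := by
  induction js generalizing L with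
  | nil => rfl
  | cons j t ih => rw [List.foldl_cons, ih, List.length_set]

-- per-set selections of the pair list (what A computes for one set)
def pvF (pairs : List (Int × Int)) (s : List Int) : List Int :=
  (pairs.filter (fun p => decide (p.1 ∈ s))).map Prod.fst
def pvG (pairs : List (Int × Int)) (s : List Int) : List Int :=
  (pairs.filter (fun p => decide (p.1 ∈ s))).map Prod.snd

-- A's inner loop
theorem a_inner (pairs : List (Int × Int)) (s : List Int) (a b : List Int) :
    pairs.foldl (fun t p => if p.1 ∈ s then (t.1 ++ [p.1], t.2 ++ [p.2]) else t) (a, b)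
      = (a ++ pvF pairs s, b ++ pvG pairs s) := by
  induction pairs generalizing a b with
  | nil => simp [pvF, pvG]
  | cons p ps ih =>
    simp only [List.foldl_cons]
    by_cases h : p.1 ∈ s
    · rw [if_pos h, ih]
      simp [pvF, pvG, List.filter_cons, h]
    · rw [if_neg h, ih]
      simp [pvF, pvG, List.filter_cons, h]

-- A's outer loop
theorem a_outer (oi : List (List Int)) (pairs : List (Int × Int)) (a b : List (List Int)) :
    oi.foldl (fun acc s =>
        let t := pairs.foldl (fun t p => if p.1 ∈ s then (t.1 ++ [p.1], t.2 ++ [p.2]) else t) ([], [])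
        (acc.1 ++ [t.1], acc.2 ++ [t.2])) (a, b)
      = (a ++ oi.map (pvF pairs), b ++ oi.map (pvG pairs)) := by
  induction oi generalizing a b with
  | nil => simp
  | cons s r ih =>
    have hstep : (s :: r).foldl (fun acc s =>
        let t := pairs.foldl (fun t p => if p.1 ∈ s then (t.1 ++ [p.1], t.2 ++ [p.2]) else t) ([], [])
        (acc.1 ++ [t.1], acc.2 ++ [t.2])) (a, b)
      = r.foldl (fun acc s =>
        let t := pairs.foldl (fun t p => if p.1 ∈ s then (t.1 ++ [p.1], t.2 ++ [p.2]) else t) ([], [])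
        (acc.1 ++ [t.1], acc.2 ++ [t.2]))
        (a ++ [pvF pairs s], b ++ [pvG pairs s]) := by
      show r.foldl _ (a ++ [(pairs.foldl (fun t p => if p.1 ∈ s then (t.1 ++ [p.1], t.2 ++ [p.2]) else t) ([], [])).1],
        b ++ [(pairs.foldl (fun t p => if p.1 ∈ s then (t.1 ++ [p.1], t.2 ++ [p.2]) else t) ([], [])).2]) = _
      rw [a_inner pairs s [] []]
      simp
    rw [hstep, ih]
    simp [List.append_assoc]

theorem a_eq (oi : List (List Int)) (si sl : List Int) :
    reorder_split_inds oi si sl = (oi.map (pvF (si.zip sl)), oi.map (pvG (si.zip sl))) := by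
  have h := a_outer oi (si.zip sl) [] []
  simp only [List.nil_append] at h
  exact h

-- B's filling loop as a named fold (definitionally the loop in reorder_split_inds_alt)
def pvFill (w : PySem.Dict Int (List Int)) (pairs : List (Int × Int))
    (AB : List (List Int) × List (List Int)) : List (List Int) × List (List Int) :=
  pairs.foldl
    (fun acc p =>
      (w.getD p.1 []).foldl
        (fun acc j =>
          (acc.1.set j.toNat (acc.1.getD j.toNat [] ++ [p.1]),
           acc.2.set j.toNat (acc.2.getD j.toNat [] ++ [p.2]))) acc) AB

theorem fill_inv (oi : List (List Int)) (w : PySem.Dict Int (List Int))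
    (hw : ∀ x, w.getD x [] = pvSel x oi 0)
    (pairs : List (Int × Int)) (A B : List (List Int))
    (hA : A.length = oi.length) (hB : B.length = oi.length) :
    (pvFill w pairs (A, B)).1.length = oi.length ∧ (pvFill w pairs (A, B)).2.length = oi.length ∧
      (∀ i : Nat, (pvFill w pairs (A, B)).1.getD i [] = A.getD i [] ++ pvF pairs (oi.getD i [])) ∧
      (∀ i : Nat, (pvFill w pairs (A, B)).2.getD i [] = B.getD i [] ++ pvG pairs (oi.getD i [])) := by
  induction pairs generalizing A B with
  | nil => simp [pvFill, pvF, pvG, hA, hB]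
  | cons p ps ih =>
    have hsplit := foldl_pair_split (w.getD p.1 [])
      (fun M j => M.set j.toNat (M.getD j.toNat [] ++ [p.1]))
      (fun M j => M.set j.toNat (M.getD j.toNat [] ++ [p.2])) A B
    have hstep : pvFill w (p :: ps) (A, B) = pvFill w ps
        ((w.getD p.1 []).foldl (fun M j => M.set j.toNat (M.getD j.toNat [] ++ [p.1])) A,
         (w.getD p.1 []).foldl (fun M j => M.set j.toNat (M.getD j.toNat [] ++ [p.2])) B) := by
      show pvFill w ps ((w.getD p.1 []).foldl
        (fun acc j =>
          (acc.1.set j.toNat (acc.1.getD j.toNat [] ++ [p.1]),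
           acc.2.set j.toNat (acc.2.getD j.toNat [] ++ [p.2]))) (A, B)) = _
      rw [hsplit]
    have hjsel : w.getD p.1 [] = pvSel p.1 oi 0 := hw p.1
    have hnd : (w.getD p.1 []).Nodup := hjsel ▸ pvSel_nodup _ _ _
    have hbA : ∀ j ∈ w.getD p.1 [], 0 ≤ j ∧ j.toNat < A.length := by
      intro j hj
      have := pvSel_bound (hjsel ▸ hj)
      constructor <;> omega
    have hbB : ∀ j ∈ w.getD p.1 [], 0 ≤ j ∧ j.toNat < B.length := by
      intro j hj
      have := pvSel_bound (hjsel ▸ hj)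
      constructor <;> omega
    have lA := setfold_length (w.getD p.1 []) p.1 A
    have lB := setfold_length (w.getD p.1 []) p.2 B
    rw [hstep]
    obtain ⟨h1, h2, h3, h4⟩ := ih _ _ (lA.trans hA) (lB.trans hB)
    refine ⟨h1, h2, ?_, ?_⟩
    · intro i
      rw [h3 i, setfold_getD (w.getD p.1 []) hnd p.1 A hbA i]
      have hmem : ((i : Int) ∈ w.getD p.1 []) ↔ p.1 ∈ oi.getD i [] :=
        hjsel ▸ pvSel_mem_getD p.1 oi i
      simp only [pvF, List.filter_cons]
      by_cases hm : p.1 ∈ oi.getD i []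
      · rw [if_pos (hmem.mpr hm), if_pos (decide_eq_true_iff.mpr hm)]
        simp
      · rw [if_neg (fun hc => hm (hmem.mp hc)), if_neg (by simpa using hm)]
        simp
    · intro i
      rw [h4 i, setfold_getD (w.getD p.1 []) hnd p.2 B hbB i]
      have hmem : ((i : Int) ∈ w.getD p.1 []) ↔ p.1 ∈ oi.getD i [] :=
        hjsel ▸ pvSel_mem_getD p.1 oi i
      simp only [pvG, List.filter_cons]
      by_cases hm : p.1 ∈ oi.getD i []
      · rw [if_pos (hmem.mpr hm), if_pos (decide_eq_true_iff.mpr hm)]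
        simp
      · rw [if_neg (fun hc => hm (hmem.mp hc)), if_neg (by simpa using hm)]
        simp

theorem b_eq (oi : List (List Int)) (si sl : List Int) :
    reorder_split_inds_alt oi si sl = (oi.map (pvF (si.zip sl)), oi.map (pvG (si.zip sl))) := by
  have hdef : reorder_split_inds_alt oi si sl
      = pvFill ((PySem.List.enumerate oi).foldl
          (fun d p => (PySem.List.dedup p.2).foldl (fun d x => d.modify x [] (· ++ [p.1])) d)
          PySem.Dict.empty)
        (si.zip sl) (oi.map (fun _ => []), oi.map (fun _ => [])) := rfl
  have hw : ∀ x, ((PySem.List.enumerate oi).foldl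
      (fun d p => (PySem.List.dedup p.2).foldl (fun d x => d.modify x [] (· ++ [p.1])) d)
      PySem.Dict.empty).getD x [] = pvSel x oi 0 := by
    intro x
    have := w_getD oi 0 PySem.Dict.empty x
    simpa [PySem.List.enumerate] using this
  have hA0 : ∀ i : Nat, (oi.map (fun _ => ([] : List Int))).getD i [] = [] := by
    intro i
    by_cases h : i < oi.length
    · rw [List.getD_eq_getElem _ _ (by simpa using h)]
      simp
    · rw [List.getD_eq_default _ _ (by simpa using h)]
  obtain ⟨h1, h2, h3, h4⟩ := fill_inv oi _ hw (si.zip sl)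
    (oi.map (fun _ => [])) (oi.map (fun _ => [])) (by simp) (by simp)
  rw [hdef]
  refine Prod.ext ?_ ?_
  · apply List.ext_getElem (by rw [h1, List.length_map])
    intro i hi hi2
    have hio : i < oi.length := by rw [h1] at hi; exact hi
    have hth := h3 i
    rw [hA0 i, List.nil_append, List.getD_eq_getElem oi [] hio] at hth
    rw [List.getElem_map, ← hth]
    exact (List.getD_eq_getElem _ [] hi).symm
  · apply List.ext_getElem (by rw [h2, List.length_map])
    intro i hi hi2
    have hio : i < oi.length := by rw [h2] at hi; exact hi
    have hth := h4 i
    rw [hA0 i, List.nil_append, List.getD_eq_getElem oi [] hio] at hth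
    rw [List.getElem_map, ← hth]
    exact (List.getD_eq_getElem _ [] hi).symm

-- ===== VERDICT (by name: the statement is the Claim_ definition above) =====
theorem reorder_split_inds_spec : Claim_equal_reorder_split_inds := by
  intro oi si sl _
  unfold Spec_reorder_split_inds
  rw [a_eq, b_eq]
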